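-- pv_equiv track=rewrite | github.com/sirfrancis553544/grant-monitor | run.py | apply_source_cap
-- ===== SOURCE A (Python) =====
-- def apply_source_cap(items: list[dict], max_per_source: int = 3) -> list[dict]:
--     """
--     Keep ranked order, but limit how many items from the same source
--     can appear in the final digest list.
--     """
--     out: list[dict] = []
--     counts: dict[str, int] = {}
--
--     for g in items:
--         source = (g.get("source") or "unknown").strip()
--         current = counts.get(source, 0)
--
--         if current >= max_per_source:
--             continue
--
--         out.append(g)
--         counts[source] = current + 1
--
--     return out
-- ===== SOURCE B (Python) =====
-- def apply_source_cap(items: list[dict], max_per_source: int = 3) -> list[dict]: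
--     """Group item positions by normalized source, keep the first
--     max_per_source positions of each group, then select the kept
--     positions in original order."""
--     groups: dict[str, list[int]] = {}
--     for i, g in enumerate(items):
--         s = (g.get("source") or "unknown").strip()
--         groups.setdefault(s, []).append(i)
--     kept: set[int] = set()
--     for idxs in groups.values():
--         for rank, i in enumerate(idxs):
--             if rank < max_per_source:
--                 kept.add(i)
--     return [g for i, g in enumerate(items) if i in kept]
-- ===== Notes on version B (the rewrite author's own statement) =====
-- stated objective: alternative
-- what changed: Replaces A's single streaming pass with a per-source running counter by a staged group-then-select algorithm: first build a dict mapping each normalized source to the ordered list of positions where it occurs, then collect into a set the first max_per_source positions of every group, and finally emit the items whose position is in that set, which restores rank order.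
import Mathlib
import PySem

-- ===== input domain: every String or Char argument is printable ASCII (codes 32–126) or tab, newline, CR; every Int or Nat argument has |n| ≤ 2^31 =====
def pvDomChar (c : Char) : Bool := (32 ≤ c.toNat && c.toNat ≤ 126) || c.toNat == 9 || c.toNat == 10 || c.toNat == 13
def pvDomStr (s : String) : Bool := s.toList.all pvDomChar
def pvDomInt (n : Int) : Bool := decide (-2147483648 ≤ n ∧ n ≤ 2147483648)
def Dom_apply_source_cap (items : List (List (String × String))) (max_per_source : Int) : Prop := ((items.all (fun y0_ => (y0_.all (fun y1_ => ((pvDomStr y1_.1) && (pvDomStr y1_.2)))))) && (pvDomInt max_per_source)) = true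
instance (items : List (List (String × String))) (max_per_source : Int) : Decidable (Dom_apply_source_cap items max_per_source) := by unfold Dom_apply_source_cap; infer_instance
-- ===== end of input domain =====

-- B replaces A's single streaming pass with running per-source counters by a staged
-- group-then-select algorithm: group positions by source, keep each group's first
-- max_per_source positions, then emit the kept positions in order (objective: alternative).

-- ===== PORT A =====
-- (g.get("source") or "unknown").strip() — shared normalization, used verbatim by both Pythons
def pvNorm (g : List (String × String)) : String :=
  PySem.Str.strip (match List.lookup "source" g with
    | none => "unknown"
    | some s => if s == "" then "unknown" else s)

-- the body of A's for-loop over (out, counts)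
def pvStepA (max_per_source : Int)
    (st : List (List (String × String)) × PySem.Dict String Int)
    (g : List (String × String)) :
    List (List (String × String)) × PySem.Dict String Int :=
  let source := pvNorm g
  let current := st.2.getD source 0
  if current ≥ max_per_source then st
  else (st.1 ++ [g], st.2.insert source (current + 1))

def apply_source_cap (items : List (List (String × String))) (max_per_source : Int) : List (List (String × String)) :=
  (items.foldl (pvStepA max_per_source) ([], PySem.Dict.empty)).1

-- ===== PORT B =====
-- groups: normalized source ↦ ordered list of the positions where it occurs
def pvGroups (items : List (List (String × String))) : PySem.Dict String (List Int) :=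
  (PySem.List.enumerate items 0).foldl
    (fun d p => d.modify (pvNorm p.2) [] (· ++ [p.1])) PySem.Dict.empty

-- kept: the first max_per_source positions of every group, as a set
def pvKept (items : List (List (String × String))) (max_per_source : Int) : PySem.Set Int :=
  (pvGroups items).values.foldl
    (fun k idxs => (PySem.List.enumerate idxs 0).foldl
        (fun k p => if p.1 < max_per_source then PySem.Set.add k p.2 else k) k)
    PySem.Set.empty

def apply_source_cap_alt (items : List (List (String × String))) (max_per_source : Int) : List (List (String × String)) :=
  ((PySem.List.enumerate items 0).filter
      (fun p => PySem.Set.contains (pvKept items max_per_source) p.1)).map (·.2)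

-- ===== PRECONDITION & SPEC =====
def Spec_apply_source_cap (items : List (List (String × String))) (max_per_source : Int) (out : List (List (String × String))) : Prop := out = apply_source_cap_alt items max_per_source
instance (items : List (List (String × String))) (max_per_source : Int) (out : List (List (String × String))) : Decidable (Spec_apply_source_cap items max_per_source out) := by unfold Spec_apply_source_cap; infer_instance

-- ===== CLAIM (what is proved, stated in full; the proofs are below) =====
def Claim_equal_apply_source_cap : Prop := ∀ (items : List (List (String × String))) (max_per_source : Int), Dom_apply_source_cap items max_per_source → Spec_apply_source_cap items max_per_source (apply_source_cap items max_per_source)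

-- ===== LEMMAS AND PROOFS =====

-- reference form: keep g iff its normalized source occurs < max times among the prior norms h
def pvRef (max_per_source : Int) : List String → List (List (String × String)) → List (List (String × String))
  | _, [] => []
  | h, g :: rest =>
    if (h.count (pvNorm g) : Int) < max_per_source then
      g :: pvRef max_per_source (h ++ [pvNorm g]) rest
    else pvRef max_per_source (h ++ [pvNorm g]) rest

-- A's fold with any state whose counts agree with min(count in h, max ⊔ 0) produces pvRef
lemma pvFoldA (max_per_source : Int) :
    ∀ (rest : List (List (String × String))) (h : List String)
      (out : List (List (String × String))) (d : PySem.Dict String Int),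
      (∀ s, d.getD s 0 = min ((h.count s : Int)) (max_per_source ⊔ 0)) →
      (rest.foldl (pvStepA max_per_source) (out, d)).1 = out ++ pvRef max_per_source h rest := by
  intro rest
  induction rest with
  | nil => intro h out d _; simp [pvRef]
  | cons g rest ih =>
    intro h out d hd
    have hc0 : (0 : Int) ≤ (h.count (pvNorm g) : Int) := Int.natCast_nonneg _
    by_cases hk : (h.count (pvNorm g) : Int) < max_per_source
    · have hstep : pvStepA max_per_source (out, d) g
          = (out ++ [g], d.insert (pvNorm g) (d.getD (pvNorm g) 0 + 1)) := by
        have : ¬ d.getD (pvNorm g) 0 ≥ max_per_source := by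
          rw [hd]; omega
        simp [pvStepA, this]
      have hinv : ∀ s, (d.insert (pvNorm g) (d.getD (pvNorm g) 0 + 1)).getD s 0
          = min (((h ++ [pvNorm g]).count s : Int)) (max_per_source ⊔ 0) := by
        intro s
        rw [PySem.Dict.getD_insert]
        by_cases hs : s = pvNorm g
        · subst hs
          have hca : (h ++ [pvNorm g]).count (pvNorm g) = h.count (pvNorm g) + 1 := by
            rw [List.count_append]; simp
          rw [if_pos rfl, hd, hca]
          push_cast
          omega
        · have hz : List.count s [pvNorm g] = 0 := by
            simp [List.count_singleton]
            exact fun hEq => hs hEq.symm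
          rw [if_neg hs, hd s, List.count_append, hz]
          norm_num
      rw [List.foldl_cons, hstep, ih (h ++ [pvNorm g]) (out ++ [g]) _ hinv]
      simp [pvRef, hk]
    · have hstep : pvStepA max_per_source (out, d) g = (out, d) := by
        have : d.getD (pvNorm g) 0 ≥ max_per_source := by rw [hd]; omega
        simp [pvStepA, this]
      have hinv : ∀ s, d.getD s 0
          = min (((h ++ [pvNorm g]).count s : Int)) (max_per_source ⊔ 0) := by
        intro s
        rw [hd s, List.count_append]
        by_cases hs : s = pvNorm g
        · subst hs
          have hca : List.count (pvNorm g) [pvNorm g] = 1 := by simp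
          rw [hca]
          push_cast
          omega
        · have hz : List.count s [pvNorm g] = 0 := by
            simp [List.count_singleton]
            exact fun hEq => hs hEq.symm
          rw [hz]
          norm_num
      rw [List.foldl_cons, hstep, ih (h ++ [pvNorm g]) out d hinv]
      simp [pvRef, hk]

lemma pvA_eq_ref (items : List (List (String × String))) (max_per_source : Int) :
    apply_source_cap items max_per_source = pvRef max_per_source [] items := by
  unfold apply_source_cap
  have h0 : ∀ s : String, (PySem.Dict.empty : PySem.Dict String Int).getD s 0
      = min ((([] : List String).count s : Int)) (max_per_source ⊔ 0) := by
    intro s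
    simp [pysem]
  rw [pvFoldA max_per_source items [] [] PySem.Dict.empty h0]
  simp

-- enumerate commutes with the source normalization
lemma pvEnumMap : ∀ (xs : List (List (String × String))) (a : Int),
    (PySem.List.enumerate xs a).map (fun p => (pvNorm p.2, p.1))
      = (PySem.List.enumerate (xs.map pvNorm) a).map (fun p => (p.2, p.1)) := by
  intro xs
  induction xs with
  | nil => intro a; simp [PySem.List.enumerate_nil]
  | cons x xs ih => intro a; simp [PySem.List.enumerate_cons, ih]

-- each group's value is the ordered list of positions whose normalized source is s
lemma pvGroups_getD (items : List (List (String × String))) (s : String) :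
    (pvGroups items).getD s []
      = (((PySem.List.enumerate (items.map pvNorm) 0).filter (fun p => p.2 == s)).map (·.1)) := by
  unfold pvGroups
  have h1 : (PySem.List.enumerate items 0).foldl
      (fun d p => d.modify (pvNorm p.2) [] (· ++ [p.1])) PySem.Dict.empty
      = (((PySem.List.enumerate items 0).map (fun p => (pvNorm p.2, p.1))).foldl
          (fun d q => d.modify q.1 [] (· ++ [q.2])) PySem.Dict.empty) := by
    rw [List.foldl_map]
  rw [h1, pvEnumMap, PySem.Dict.getD_foldl_modify_append]
  simp [List.filter_map, Function.comp_def]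

lemma pvGroups_keys (items : List (List (String × String))) :
    (pvGroups items).keys = PySem.Set.ofList (items.map pvNorm) := by
  unfold pvGroups
  rw [PySem.Dict.keys_foldl_modify_key]
  have : (PySem.List.enumerate items 0).map (fun p => pvNorm p.2) = items.map pvNorm := by
    rw [show (fun p : Int × List (String × String) => pvNorm p.2) = pvNorm ∘ (·.2) from rfl,
      ← List.map_map, PySem.List.map_snd_enumerate]
  rw [this]
  simp [PySem.Set.update, PySem.Set.ofList_eq_foldl, PySem.Dict.keys_empty]

lemma pvGroups_nodup (items : List (List (String × String))) :
    (pvGroups items).keys.Nodup := by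
  unfold pvGroups
  exact PySem.Dict.nodup_keys_foldl_modify_key _ _ _ _ _ PySem.Dict.nodup_keys_empty

-- the r-th position of source s is the k with ss[k] = s preceded by exactly r occurrences of s
lemma pvGrpIdx : ∀ (ss : List String) (s : String) (a : Int) (r : Nat) (i : Int),
    ((((PySem.List.enumerate ss a).filter (fun p => p.2 == s)).map (·.1))[r]? = some i)
      ↔ ∃ k : Nat, ∃ hk : k < ss.length, i = a + k ∧ ss[k] = s ∧ (ss.take k).count s = r := by
  intro ss
  induction ss with
  | nil => intro s a r i; simp [PySem.List.enumerate_nil]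
  | cons x xs ih =>
    intro s a r i
    rw [PySem.List.enumerate_cons, List.filter_cons]
    by_cases hx : x = s
    · subst hx
      simp only [beq_self_eq_true, if_pos, List.map_cons]
      match r with
      | 0 =>
        simp only [List.getElem?_cons_zero, Option.some.injEq]
        constructor
        · rintro rfl
          exact ⟨0, by simp, by simp⟩
        · rintro ⟨k, hk, rfl, hs, hc⟩
          match k with
          | 0 => simp
          | k + 1 =>
            exfalso
            simp only [List.take_succ_cons, List.count_cons_self] at hc
            omega
      | r + 1 =>
        rw [List.getElem?_cons_succ, ih]
        constructor
        · rintro ⟨k, hk, rfl, hs, hc⟩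
          refine ⟨k + 1, by simp only [List.length_cons]; omega, by push_cast; ring, by simpa using hs, ?_⟩
          simp only [List.take_succ_cons, List.count_cons_self]
          omega
        · rintro ⟨k, hk, rfl, hs, hc⟩
          match k with
          | 0 => simp at hc
          | k + 1 =>
            refine ⟨k, by simp only [List.length_cons] at hk; omega, by push_cast; ring, by simpa using hs, ?_⟩
            simp only [List.take_succ_cons, List.count_cons_self] at hc
            omega
    · have hbx : (x == s) = false := by simpa using hx
      simp only [hbx, Bool.false_eq_true, if_false]
      rw [ih]
      constructor
      · rintro ⟨k, hk, rfl, hs, hc⟩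
        refine ⟨k + 1, by simp only [List.length_cons]; omega, by push_cast; ring, by simpa using hs, ?_⟩
        rw [List.take_succ_cons, List.count_cons_of_ne (by simpa using hx)]
        exact hc
      · rintro ⟨k, hk, rfl, hs, hc⟩
        match k with
        | 0 => exact absurd (by simpa using hs) hx
        | k + 1 =>
          refine ⟨k, by simp only [List.length_cons] at hk; omega, by push_cast; ring, by simpa using hs, ?_⟩
          rw [List.take_succ_cons, List.count_cons_of_ne (by simpa using hx)] at hc
          exact hc

lemma pvInnerMem (max_per_source : Int) :
    ∀ (idxs : List Int) (a : Int) (k : PySem.Set Int) (x : Int),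
      (x ∈ (PySem.List.enumerate idxs a).foldl
          (fun k p => if p.1 < max_per_source then PySem.Set.add k p.2 else k) k)
        ↔ x ∈ k ∨ ∃ r : Nat, ∃ hr : r < idxs.length, (a + r : Int) < max_per_source ∧ idxs[r] = x := by
  intro idxs
  induction idxs with
  | nil => intro a k x; simp [PySem.List.enumerate_nil]
  | cons i idxs ih =>
    intro a k x
    rw [PySem.List.enumerate_cons, List.foldl_cons]
    by_cases ha : a < max_per_source
    · simp only [ha, if_pos]
      rw [ih, PySem.Set.mem_add]
      constructor
      · rintro ((hx | hx) | ⟨r, hr, hlt, he⟩)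
        · exact Or.inl hx
        · exact Or.inr ⟨0, by simp, by simpa using ha, by simpa using hx.symm⟩
        · exact Or.inr ⟨r + 1, by simp only [List.length_cons]; omega, by omega, by simpa using he⟩
      · rintro (hx | ⟨r, hr, hlt, he⟩)
        · exact Or.inl (Or.inl hx)
        · match r with
          | 0 => exact Or.inl (Or.inr (by simpa using he.symm))
          | r + 1 =>
            refine Or.inr ⟨r, by simp only [List.length_cons] at hr; omega, by omega, by simpa using he⟩
    · simp only [ha, if_false]
      rw [ih]
      constructor
      · rintro (hx | ⟨r, hr, hlt, he⟩)
        · exact Or.inl hx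
        · exact Or.inr ⟨r + 1, by simp only [List.length_cons]; omega, by omega, by simpa using he⟩
      · rintro (hx | ⟨r, hr, hlt, he⟩)
        · exact Or.inl hx
        · match r with
          | 0 => exact absurd (by simpa using hlt) ha
          | r + 1 =>
            refine Or.inr ⟨r, by simp only [List.length_cons] at hr; omega, by omega, by simpa using he⟩

lemma pvOuterMem (max_per_source : Int) :
    ∀ (vals : List (List Int)) (k : PySem.Set Int) (x : Int),
      (x ∈ vals.foldl
          (fun k idxs => (PySem.List.enumerate idxs 0).foldl
              (fun k p => if p.1 < max_per_source then PySem.Set.add k p.2 else k) k) k)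
        ↔ x ∈ k ∨ ∃ idxs ∈ vals, ∃ r : Nat, ∃ hr : r < idxs.length,
            (r : Int) < max_per_source ∧ idxs[r] = x := by
  intro vals
  induction vals with
  | nil => intro k x; simp
  | cons idxs vals ih =>
    intro k x
    rw [List.foldl_cons, ih]
    rw [pvInnerMem]
    constructor
    · rintro ((hx | ⟨r, hr, hlt, he⟩) | ⟨l, hl, r, hr, hlt, he⟩)
      · exact Or.inl hx
      · exact Or.inr ⟨idxs, by simp, r, hr, by simpa using hlt, he⟩
      · exact Or.inr ⟨l, by simp [hl], r, hr, hlt, he⟩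
    · rintro (hx | ⟨l, hl, r, hr, hlt, he⟩)
      · exact Or.inl (Or.inl hx)
      · rcases List.mem_cons.mp hl with h | h
        · subst h; exact Or.inl (Or.inr ⟨r, hr, by simpa using hlt, he⟩)
        · exact Or.inr ⟨l, h, r, hr, hlt, he⟩

-- a position is kept iff fewer than max prior positions share its normalized source
lemma pvKept_mem (items : List (List (String × String))) (max_per_source : Int) (x : Int) :
    x ∈ pvKept items max_per_source
      ↔ ∃ k : Nat, ∃ hk : k < items.length, x = (k : Int) ∧
          (((items.map pvNorm).take k).count (pvNorm items[k]) : Int) < max_per_source := by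
  unfold pvKept
  rw [pvOuterMem]
  have hvals : (pvGroups items).values = ((pvGroups items).keys).map (fun s => (pvGroups items).getD s []) :=
    PySem.Dict.values_eq_map_keys _ (pvGroups_nodup items) []
  constructor
  · rintro (hx | ⟨idxs, hmem, r, hr, hlt, he⟩)
    · simp [PySem.Set.empty] at hx
    · rw [hvals, List.mem_map] at hmem
      obtain ⟨s, _, rfl⟩ := hmem
      have this : ((pvGroups items).getD s [])[r]? = some x :=
        List.getElem?_eq_some_iff.mpr ⟨hr, he⟩
      rw [pvGroups_getD, pvGrpIdx] at this
      obtain ⟨k, hk, hi, hs, hc⟩ := this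
      refine ⟨k, by simpa using hk, by simpa using hi, ?_⟩
      have hsk : (items.map pvNorm)[k]'(by simpa using hk) = pvNorm (items[k]'(by simpa using hk)) := by
        simp
      rw [← hsk, hs, hc]
      exact hlt
  · rintro ⟨k, hk, rfl, hc⟩
    right
    set s := pvNorm items[k] with hs
    refine ⟨(pvGroups items).getD s [], ?_, ((items.map pvNorm).take k).count s, ?_⟩
    · rw [hvals, List.mem_map]
      refine ⟨s, ?_, rfl⟩
      rw [pvGroups_keys, PySem.Set.mem_ofList]
      exact List.mem_map.mpr ⟨items[k], List.getElem_mem hk, rfl⟩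
    · have : (((PySem.List.enumerate (items.map pvNorm) 0).filter (fun p => p.2 == s)).map (·.1))[((items.map pvNorm).take k).count s]? = some (k : Int) := by
        rw [pvGrpIdx]
        exact ⟨k, by simpa using hk, by simp, by simp [hs], rfl⟩
      rw [pvGroups_getD]
      obtain ⟨hlen, hval⟩ := List.getElem?_eq_some_iff.mp this
      exact ⟨hlen, hc, hval⟩

lemma pvBsuffix (items : List (List (String × String))) (max_per_source : Int) :
    ∀ (rest pre : List (List (String × String))), items = pre ++ rest →
      ((PySem.List.enumerate rest (pre.length : Int)).filter
          (fun p => PySem.Set.contains (pvKept items max_per_source) p.1)).map (·.2)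
        = pvRef max_per_source (pre.map pvNorm) rest := by
  intro rest
  induction rest with
  | nil => intro pre _; simp [pvRef, PySem.List.enumerate_nil]
  | cons g rest ih =>
    intro pre hitems
    rw [PySem.List.enumerate_cons, List.filter_cons]
    have hklen : pre.length < items.length := by subst hitems; simp
    have hget : items[pre.length]'hklen = g := by
      subst hitems
      rw [List.getElem_append_right (Nat.le_refl _)]
      simp
    have htake : (items.map pvNorm).take pre.length = pre.map pvNorm := by
      subst hitems
      rw [List.map_append, List.take_left' (by simp)]
    have hcond : PySem.Set.contains (pvKept items max_per_source) (pre.length : Int)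
        = decide ((((pre.map pvNorm).count (pvNorm g) : Int)) < max_per_source) := by
      rcases Decidable.em ((((pre.map pvNorm).count (pvNorm g) : Int)) < max_per_source) with h | h
      · rw [decide_eq_true h]
        rw [PySem.Set.contains_iff, pvKept_mem]
        exact ⟨pre.length, hklen, rfl, by rw [htake, hget]; exact h⟩
      · rw [decide_eq_false h]
        rw [← Bool.not_eq_true, PySem.Set.contains_iff, pvKept_mem]
        rintro ⟨k, hk, hkx, hlt⟩
        have : k = pre.length := by exact_mod_cast hkx.symm
        subst this
        rw [htake, hget] at hlt
        exact h hlt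
    have hnext : items = (pre ++ [g]) ++ rest := by simpa [List.append_assoc] using hitems
    have hlen1 : (pre.length : Int) + 1 = (((pre ++ [g]).length : Nat) : Int) := by simp
    by_cases h : (((pre.map pvNorm).count (pvNorm g) : Int)) < max_per_source
    · rw [hcond, decide_eq_true h]
      simp only [if_pos, List.map_cons]
      rw [hlen1, ih (pre ++ [g]) hnext]
      conv_rhs => rw [pvRef]
      rw [if_pos h]
      simp
    · rw [hcond, decide_eq_false h]
      simp only [Bool.false_eq_true, if_false]
      rw [hlen1, ih (pre ++ [g]) hnext]
      conv_rhs => rw [pvRef]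
      rw [if_neg h]
      simp

lemma pvB_eq_ref (items : List (List (String × String))) (max_per_source : Int) :
    apply_source_cap_alt items max_per_source = pvRef max_per_source [] items := by
  unfold apply_source_cap_alt
  have h := pvBsuffix items max_per_source items [] rfl
  simpa using h

-- ===== VERDICT (by name: the statement is the Claim_ definition above) =====
theorem apply_source_cap_spec : Claim_equal_apply_source_cap := by
  intro items max_per_source _
  unfold Spec_apply_source_cap
  rw [pvA_eq_ref, pvB_eq_ref]
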